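-- pv_equiv track=rewrite | github.com/asun0123/projects | Scraper_2.py | format_mining_property_profile_data_for_csv
-- ===== SOURCE A (Python) =====
-- def format_mining_property_profile_data_for_csv(property_profiles):
--     if not property_profiles:
--         return {
--             'property_profile_akas': 'NaN',
--             'property_profile_types': 'NaN',
--             'property_profile_dev_stages': 'NaN',
--             'property_profile_activity_statuses': 'NaN',
--             'property_profile_countries': 'NaN',
--             'property_profile_states': 'NaN',
--         }
--
--     def format_nested_with_braces(items):
--         if not items:
--             return 'NaN'
--         formatted_items = []
--         for item in items:
--             if item and str(item).strip():
--                 formatted_items.append('{' + str(item) + '}')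
--             else:
--                 formatted_items.append('{NaN}')
--         return ', '.join(formatted_items)
--
--     return {
--         'property_profile_akas': format_nested_with_braces([p.get('property_profile_aka', '') for p in property_profiles]),
--         'property_profile_types': format_nested_with_braces([p.get('property_profile_type', '') for p in property_profiles]),
--         'property_profile_dev_stages': format_nested_with_braces([p.get('property_profile_dev_stage', '') for p in property_profiles]),
--         'property_profile_activity_statuses': format_nested_with_braces([p.get('property_profile_activity_status', '') for p in property_profiles]),
--         'property_profile_countries': format_nested_with_braces([p.get('property_profile_country', '') for p in property_profiles]),
--         'property_profile_states': format_nested_with_braces([p.get('property_profile_state', '') for p in property_profiles]),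
--     }
-- ===== SOURCE B (Python) =====
-- FIELD_TABLE = [
--     ('property_profile_akas', 'property_profile_aka'),
--     ('property_profile_types', 'property_profile_type'),
--     ('property_profile_dev_stages', 'property_profile_dev_stage'),
--     ('property_profile_activity_statuses', 'property_profile_activity_status'),
--     ('property_profile_countries', 'property_profile_country'),
--     ('property_profile_states', 'property_profile_state'),
-- ]
--
--
-- def _cell(p, key):
--     value = p.get(key, '')
--     if value and str(value).strip():
--         return '{' + str(value) + '}'
--     return '{NaN}'
--
--
-- def format_mining_property_profile_data_for_csv(property_profiles):
--     if not property_profiles: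
--         return {name: 'NaN' for name, _ in FIELD_TABLE}
--     # row-major: one row of six formatted cells per profile, then transpose
--     rows = [[_cell(p, key) for _, key in FIELD_TABLE] for p in property_profiles]
--     columns = zip(*rows)
--     return {name: ', '.join(col)
--             for (name, _), col in zip(FIELD_TABLE, columns)}
-- ===== Notes on version B (the rewrite author's own statement) =====
-- stated objective: alternative
-- what changed: Replaces A's six independent column passes (comprehension + helper per field) with a table-driven row-major construction: one row of six formatted cells per profile, transposed with zip(*rows) into columns that are joined per output name.
import Mathlib
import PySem

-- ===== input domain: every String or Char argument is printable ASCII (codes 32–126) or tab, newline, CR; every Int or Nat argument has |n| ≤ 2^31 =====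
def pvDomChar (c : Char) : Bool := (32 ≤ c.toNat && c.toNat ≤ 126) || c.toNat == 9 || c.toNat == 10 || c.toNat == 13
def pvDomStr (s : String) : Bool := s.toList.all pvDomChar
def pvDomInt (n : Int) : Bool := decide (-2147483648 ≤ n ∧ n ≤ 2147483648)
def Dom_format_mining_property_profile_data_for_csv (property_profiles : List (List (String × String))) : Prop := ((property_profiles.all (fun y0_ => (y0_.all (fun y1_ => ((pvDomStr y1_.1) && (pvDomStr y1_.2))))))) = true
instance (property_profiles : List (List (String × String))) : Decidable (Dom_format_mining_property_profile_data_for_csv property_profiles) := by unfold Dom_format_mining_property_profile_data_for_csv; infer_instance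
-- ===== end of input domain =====

-- B replaces A's six independent per-field column passes with a table-driven
-- row-major matrix (one row of six cells per profile) transposed via zip(*rows);
-- alternative decomposition, same cost.


-- ===== PORT A =====
-- string concatenation through List Char (transparent to the kernel; exact for '+' on str)
def pvCat (a b : String) : String := String.ofList (a.toList ++ b.toList)

-- helper format_nested_with_braces from A
def pvFormatNestedWithBraces (items : List String) : String :=
  if items = [] then "NaN"
  else
    let formatted := items.foldl (fun acc item =>
      if item ≠ "" ∧ PySem.Str.strip item ≠ "" then acc ++ [pvCat (pvCat "{" item) "}"]
      else acc ++ ["{NaN}"]) []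
    PySem.Str.join ", " formatted

def format_mining_property_profile_data_for_csv (property_profiles : List (List (String × String))) : List (String × String) :=
  if property_profiles = [] then
    [("property_profile_akas", "NaN"), ("property_profile_types", "NaN"),
     ("property_profile_dev_stages", "NaN"), ("property_profile_activity_statuses", "NaN"),
     ("property_profile_countries", "NaN"), ("property_profile_states", "NaN")]
  else
    [("property_profile_akas", pvFormatNestedWithBraces (property_profiles.map (fun p => PySem.Dict.getD (PySem.Dict.mk p) "property_profile_aka" ""))),
     ("property_profile_types", pvFormatNestedWithBraces (property_profiles.map (fun p => PySem.Dict.getD (PySem.Dict.mk p) "property_profile_type" ""))),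
     ("property_profile_dev_stages", pvFormatNestedWithBraces (property_profiles.map (fun p => PySem.Dict.getD (PySem.Dict.mk p) "property_profile_dev_stage" ""))),
     ("property_profile_activity_statuses", pvFormatNestedWithBraces (property_profiles.map (fun p => PySem.Dict.getD (PySem.Dict.mk p) "property_profile_activity_status" ""))),
     ("property_profile_countries", pvFormatNestedWithBraces (property_profiles.map (fun p => PySem.Dict.getD (PySem.Dict.mk p) "property_profile_country" ""))),
     ("property_profile_states", pvFormatNestedWithBraces (property_profiles.map (fun p => PySem.Dict.getD (PySem.Dict.mk p) "property_profile_state" "")))]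

-- ===== PORT B =====
-- FIELD_TABLE from Source B
def pvFieldTable : List (String × String) :=
  [("property_profile_akas", "property_profile_aka"),
   ("property_profile_types", "property_profile_type"),
   ("property_profile_dev_stages", "property_profile_dev_stage"),
   ("property_profile_activity_statuses", "property_profile_activity_status"),
   ("property_profile_countries", "property_profile_country"),
   ("property_profile_states", "property_profile_state")]

-- helper _cell from Source B
def pvCell (p : List (String × String)) (key : String) : String :=
  let value := PySem.Dict.getD (PySem.Dict.mk p) key ""
  if value ≠ "" ∧ PySem.Str.strip value ≠ "" then pvCat (pvCat "{" value) "}"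
  else "{NaN}"

-- zip(*rows): emit column of heads, recurse on tails; stops at the shortest row.
-- Fuel = length of the first row bounds the output exactly as zip does.
def pvZipCols : Nat → List (List String) → List (List String)
  | 0, _ => []
  | n + 1, rows =>
    if rows.all (· ≠ []) then
      (rows.map (fun r => r.headD "")) :: pvZipCols n (rows.map (fun r => r.tail))
    else []

def pvZipStar (rows : List (List String)) : List (List String) :=
  match rows with
  | [] => []
  | r :: rs => pvZipCols r.length (r :: rs)

def format_mining_property_profile_data_for_csv_alt (property_profiles : List (List (String × String))) : List (String × String) :=
  if property_profiles = [] then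
    pvFieldTable.map (fun nk => (nk.1, "NaN"))
  else
    let rows := property_profiles.map (fun p => pvFieldTable.map (fun nk => pvCell p nk.2))
    let columns := pvZipStar rows
    (pvFieldTable.zip columns).map (fun nc => (nc.1.1, PySem.Str.join ", " nc.2))

-- ===== PRECONDITION & SPEC =====
def Spec_format_mining_property_profile_data_for_csv (property_profiles : List (List (String × String))) (out : List (String × String)) : Prop := out = format_mining_property_profile_data_for_csv_alt property_profiles
instance (property_profiles : List (List (String × String))) (out : List (String × String)) : Decidable (Spec_format_mining_property_profile_data_for_csv property_profiles out) := by unfold Spec_format_mining_property_profile_data_for_csv; infer_instance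

-- ===== CLAIM (what is proved, stated in full; the proofs are below) =====
def Claim_equal_format_mining_property_profile_data_for_csv : Prop := ∀ (property_profiles : List (List (String × String))), Dom_format_mining_property_profile_data_for_csv property_profiles → Spec_format_mining_property_profile_data_for_csv property_profiles (format_mining_property_profile_data_for_csv property_profiles)

-- ===== LEMMAS AND PROOFS =====
-- A's per-field pass (helper on the mapped value list) equals the join of per-profile cells
theorem pvField_eq (pps : List (List (String × String))) (h : pps ≠ []) (key : String) :
    pvFormatNestedWithBraces (pps.map (fun p => PySem.Dict.getD (PySem.Dict.mk p) key "")) =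
    PySem.Str.join ", " (pps.map (fun p => pvCell p key)) := by
  unfold pvFormatNestedWithBraces
  rw [if_neg (by simpa using h)]
  rw [show (fun (acc : List String) (item : String) =>
        if item ≠ "" ∧ PySem.Str.strip item ≠ "" then acc ++ [pvCat (pvCat "{" item) "}"]
        else acc ++ ["{NaN}"]) =
      (fun acc item => acc ++ [if item ≠ "" ∧ PySem.Str.strip item ≠ "" then pvCat (pvCat "{" item) "}" else "{NaN}"])
      from by funext acc item; split_ifs <;> rfl]
  rw [PySem.List.foldl_append_singleton_eq_map]
  simp only [List.nil_append, List.map_map]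
  rfl

-- transposing the row-major 6-cell matrix yields the six column lists
theorem pvZipStar_rows (pps : List (List (String × String))) (h : pps ≠ []) :
    pvZipStar (pps.map (fun p => pvFieldTable.map (fun nk => pvCell p nk.2))) =
    [pps.map (fun p => pvCell p "property_profile_aka"),
     pps.map (fun p => pvCell p "property_profile_type"),
     pps.map (fun p => pvCell p "property_profile_dev_stage"),
     pps.map (fun p => pvCell p "property_profile_activity_status"),
     pps.map (fun p => pvCell p "property_profile_country"),
     pps.map (fun p => pvCell p "property_profile_state")] := by
  obtain ⟨q, qs, rfl⟩ := List.exists_cons_of_ne_nil h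
  simp only [pvFieldTable, List.map_cons, pvZipStar, List.length_cons]
  simp [pvZipCols, List.all_map, Function.comp]

-- ===== VERDICT (by name: the statement is the Claim_ definition above) =====
theorem format_mining_property_profile_data_for_csv_spec : Claim_equal_format_mining_property_profile_data_for_csv := by
  intro pps _
  unfold Spec_format_mining_property_profile_data_for_csv
  unfold format_mining_property_profile_data_for_csv format_mining_property_profile_data_for_csv_alt
  by_cases h : pps = []
  · simp [h, pvFieldTable]
  · rw [if_neg h, if_neg h]
    simp only [pvZipStar_rows pps h]
    simp only [pvFieldTable, List.zip_cons_cons, List.zip_nil_right, List.map_cons, List.map_nil]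
    simp only [pvField_eq pps h]
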